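-- pv_equiv track=rewrite | github.com/nandaisnanda/DigitalTraining_Group7_SookmyungUniversity_UNESCO_UNITWING | MathProbsProject/hackerrank.py | solve
-- ===== SOURCE A (Python) =====
-- def solve(arr, queries):
--     results = []
--     for query in queries:
--         x, y = query
--         # Adjust for 1-based indexing
--         x -= 1
--         y -= 1
--         odd = True
--         for i in range(x, y + 1):
--             if arr[i] % 2 == 0:
--                 odd = False
--                 break
--         if odd:
--             results.append("Odd")
--         else:
--             results.append("Even")
--     return results
-- ===== SOURCE B (Python) =====
-- def solve(arr, queries):
--     # Prefix counts of even elements; each query answered in O(1).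
--     evens = [0]
--     for v in arr:
--         evens.append(evens[-1] + (1 if v % 2 == 0 else 0))
--     out = []
--     for x, y in queries:
--         l = max(x - 1, 0)
--         out.append("Odd" if y <= l or evens[y] == evens[l] else "Even")
--     return out
-- ===== Notes on version B (the rewrite author's own statement) =====
-- stated objective: faster
-- what changed: Replaces A's per-query linear scan of the array by a prefix array of even-counts built once, so each query is answered by comparing two prefix values in O(1).
-- intended difference: On queries with x <= 0, Python's negative indices make A also scan a wrapped tail segment of the array and return 'Even' when that tail holds an even number although the queried prefix is all odd; B returns 'Odd', the intended answer for the queried range. — e.g. on solve([1, 2], [(0, 1)]): A returns ["Even"], B returns ["Odd"]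
-- outside the precondition, e.g. on solve([2], [(1, 5)]): A returns ['Even'], B raises IndexError
import Mathlib
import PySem

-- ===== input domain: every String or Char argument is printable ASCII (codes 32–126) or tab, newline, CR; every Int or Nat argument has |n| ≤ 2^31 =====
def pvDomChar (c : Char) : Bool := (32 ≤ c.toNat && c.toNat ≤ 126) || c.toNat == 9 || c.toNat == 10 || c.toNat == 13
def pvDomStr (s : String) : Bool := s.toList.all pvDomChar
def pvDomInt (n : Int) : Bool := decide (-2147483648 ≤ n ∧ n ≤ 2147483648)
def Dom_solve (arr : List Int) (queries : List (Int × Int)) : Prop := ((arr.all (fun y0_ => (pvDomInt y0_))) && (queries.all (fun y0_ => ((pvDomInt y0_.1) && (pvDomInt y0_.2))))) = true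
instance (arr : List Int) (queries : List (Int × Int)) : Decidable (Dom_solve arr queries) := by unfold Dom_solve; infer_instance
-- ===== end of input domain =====

-- B replaces A's per-query scan by a prefix array of even-counts built once, answering each query by comparing two prefix values.

-- ===== PORT A =====
-- inner loop 'for i in range(x, y+1): if arr[i] % 2 == 0: odd=False; break' — iterated lazily like
-- Python's range, stopping at the break (arr[i] is pyGetD with default 0: Python raises IndexError
-- there; Pre_solve keeps every scanned index in range)
def solveScan (arr : List Int) (i stop : Int) : Bool :=
  if h : i < stop then
    if PySem.Int.mod (PySem.List.pyGetD arr i 0) 2 == 0 then false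
    else solveScan arr (i + 1) stop
  else true
termination_by (stop - i).toNat
decreasing_by omega

def solve (arr : List Int) (queries : List (Int × Int)) : List String :=
  queries.foldl (fun results query =>
    results ++ [if solveScan arr (query.1 - 1) (query.2 - 1 + 1) then "Odd" else "Even"]) []

-- ===== PORT B =====
-- evens = [0]; for v in arr: evens.append(evens[-1] + (1 if v % 2 == 0 else 0))
def buildEvens (arr : List Int) : List Int :=
  arr.foldl (fun evens v =>
    evens ++ [PySem.List.pyGetD evens (-1) 0 + (if PySem.Int.mod v 2 == 0 then 1 else 0)]) [0]

def solve_alt (arr : List Int) (queries : List (Int × Int)) : List String :=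
  let evens := buildEvens arr
  queries.foldl (fun out q =>
    out ++ [if decide (q.2 ≤ max (q.1 - 1) 0) ||
              (PySem.List.pyGetD evens q.2 0 == PySem.List.pyGetD evens (max (q.1 - 1) 0) 0)
            then "Odd" else "Even"]) []

-- ===== PRECONDITION & SPEC =====
-- Pre_ excludes queries whose 0-based index range [x-1, y-1] runs past either end of arr: past the left end A
-- raises IndexError at once, and past the right end A either raises or (breaking at an even element before the
-- bad index) returns "Even" where B's prefix lookup raises IndexError — so those inputs are excluded too.
def Pre_solve (arr : List Int) (queries : List (Int × Int)) : Prop :=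
  ∀ q ∈ queries, q.2 < q.1 ∨ (1 - (arr.length : Int) ≤ q.1 ∧ q.2 ≤ (arr.length : Int))
instance (arr : List Int) (queries : List (Int × Int)) : Decidable (Pre_solve arr queries) := by
  unfold Pre_solve; infer_instance

def pvWitness_solve : List Int × (List (Int × Int)) := ([1, 2, 4], [(1, 2), (2, 3), (4, 1)])

-- On queries with x ≤ 0, Python's negative indices make A scan a wrapped tail segment of arr in addition to the
-- queried prefix, so A returns "Even" whenever that tail holds an even number although the prefix is all odd,
-- while B returns "Odd" — the intended answer for the queried range.
def D_solve (arr : List Int) (queries : List (Int × Int)) : Prop :=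
  ∃ q ∈ queries, (∀ v ∈ arr.take q.2.toNat, ¬ 2 ∣ v) ∧
    ∃ i ∈ PySem.List.pyRange (q.1 - 1) (min q.2 0), 2 ∣ PySem.List.pyGetD arr i 0
instance (arr : List Int) (queries : List (Int × Int)) : Decidable (D_solve arr queries) := by
  unfold D_solve; infer_instance

def Spec_solve (arr : List Int) (queries : List (Int × Int)) (out : List String) : Prop :=
  ¬ D_solve arr queries → out = solve_alt arr queries
instance (arr : List Int) (queries : List (Int × Int)) (out : List String) : Decidable (Spec_solve arr queries out) := by
  unfold Spec_solve; infer_instance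

def pvDiffWitness_solve : List Int × (List (Int × Int)) := ([1, 2], [(0, 1)])
def pvDiffWitnessOut_solve : (List String) × (List String) := (["Even"], ["Odd"])

-- ===== CLAIM (what is proved, stated in full; the proofs are below) =====
def Claim_unchanged_solve : Prop := ∀ (arr : List Int) (queries : List (Int × Int)), Dom_solve arr queries → Pre_solve arr queries → Spec_solve arr queries (solve arr queries)
def Claim_changed_solve : Prop := Dom_solve (pvDiffWitness_solve.1) (pvDiffWitness_solve.2) ∧ Pre_solve (pvDiffWitness_solve.1) (pvDiffWitness_solve.2) ∧ D_solve (pvDiffWitness_solve.1) (pvDiffWitness_solve.2) ∧ solve (pvDiffWitness_solve.1) (pvDiffWitness_solve.2) = pvDiffWitnessOut_solve.1 ∧ solve_alt (pvDiffWitness_solve.1) (pvDiffWitness_solve.2) = pvDiffWitnessOut_solve.2 ∧ pvDiffWitnessOut_solve.1 ≠ pvDiffWitnessOut_solve.2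
def Claim_exact_solve : Prop := ∀ (arr : List Int) (queries : List (Int × Int)), Dom_solve arr queries → Pre_solve arr queries → D_solve arr queries → solve arr queries ≠ solve_alt arr queries

-- ===== LEMMAS AND PROOFS =====

def pvOdd (v : Int) : Bool := !(PySem.Int.mod v 2 == 0)

lemma pvOdd_true_iff (v : Int) : pvOdd v = true ↔ ¬ 2 ∣ v := by
  simp [pvOdd, PySem.Int.mod_eq_zero_iff_dvd]

lemma pvOdd_false_iff (v : Int) : pvOdd v = false ↔ 2 ∣ v := by
  simp [pvOdd, PySem.Int.mod_eq_zero_iff_dvd]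

-- the prefix of arr a query (x, y) asks about
def pvFront (arr : List Int) (y : Int) : List Int := arr.take y.toNat
-- the tail segment of arr that A's negative indices wrap onto for a query (x, y) with x ≤ 0
def pvWrapSeg (arr : List Int) (x y : Int) : List Int :=
  (arr.drop ((arr.length : Int) + x - 1).toNat).take (min y 0 - x + 1).toNat

-- per-query value of A
def aAns (arr : List Int) (q : Int × Int) : String :=
  if solveScan arr (q.1 - 1) (q.2 - 1 + 1) then "Odd" else "Even"

-- per-query value of B
def bAns (arr : List Int) (q : Int × Int) : String :=
  if decide (q.2 ≤ max (q.1 - 1) 0) ||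
      (PySem.List.pyGetD (buildEvens arr) q.2 0 == PySem.List.pyGetD (buildEvens arr) (max (q.1 - 1) 0) 0)
  then "Odd" else "Even"

-- number of even elements among the first k of arr
def pvCnt (arr : List Int) (k : Nat) : Int :=
  ((arr.take k).countP (fun v => PySem.Int.mod v 2 == 0) : Int)

lemma solve_eq_map (arr : List Int) (queries : List (Int × Int)) :
    solve arr queries = queries.map (aAns arr) := by
  unfold solve aAns
  simpa using PySem.List.foldl_append_singleton_eq_map
    (fun q : Int × Int => if solveScan arr (q.1 - 1) (q.2 - 1 + 1) then "Odd" else "Even")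
    queries []

lemma solve_alt_eq_map (arr : List Int) (queries : List (Int × Int)) :
    solve_alt arr queries = queries.map (bAns arr) := by
  unfold solve_alt bAns
  simpa using PySem.List.foldl_append_singleton_eq_map
    (fun q : Int × Int => if decide (q.2 ≤ max (q.1 - 1) 0) ||
        (PySem.List.pyGetD (buildEvens arr) q.2 0 == PySem.List.pyGetD (buildEvens arr) (max (q.1 - 1) 0) 0)
      then "Odd" else "Even")
    queries []

lemma aAns_eq (arr : List Int) (x y : Int) :
    aAns arr (x, y) =
      if solveScan arr (x - 1) (y - 1 + 1) = true then "Odd" else "Even" := rfl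

lemma bAns_eq (arr : List Int) (x y : Int) :
    bAns arr (x, y) =
      if (decide (y ≤ max (x - 1) 0) ||
          (PySem.List.pyGetD (buildEvens arr) y 0 == PySem.List.pyGetD (buildEvens arr) (max (x - 1) 0) 0)) = true
      then "Odd" else "Even" := rfl

lemma scan_eq_all_aux (arr : List Int) (stop : Int) :
    ∀ (n : Nat) (i : Int), (stop - i).toNat ≤ n →
      solveScan arr i stop =
        (PySem.List.pyRange i stop).all (fun j => pvOdd (PySem.List.pyGetD arr j 0)) := by
  intro n
  induction n with
  | zero =>
      intro i hi
      unfold solveScan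
      rw [dif_neg (by omega : ¬ i < stop), PySem.List.pyRange_one_eq_nil (by omega)]
      rfl
  | succ n ih =>
      intro i hi
      unfold solveScan
      by_cases h : i < stop
      · rw [dif_pos h, PySem.List.pyRange_one_cons h, List.all_cons]
        by_cases he : (PySem.Int.mod (PySem.List.pyGetD arr i 0) 2 == 0) = true
        · rw [if_pos he]
          simp only [pvOdd, he, Bool.not_true, Bool.false_and]
        · rw [if_neg he, ih (i + 1) (by omega)]
          simp only [Bool.not_eq_true] at he
          simp only [pvOdd, he, Bool.not_false, Bool.true_and]
      · rw [dif_neg h, PySem.List.pyRange_one_eq_nil (by omega)]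
        rfl

lemma scan_eq_all (arr : List Int) (i stop : Int) :
    solveScan arr i stop =
      (PySem.List.pyRange i stop).all (fun j => pvOdd (PySem.List.pyGetD arr j 0)) :=
  scan_eq_all_aux arr stop (stop - i).toNat i le_rfl

lemma buildEvens_eq (arr : List Int) :
    buildEvens arr = (List.range (arr.length + 1)).map (pvCnt arr) := by
  induction arr using List.reverseRecOn with
  | nil => simp [buildEvens, pvCnt]
  | append_singleton as v ih =>
      unfold buildEvens at ih ⊢
      have hlast : PySem.List.pyGetD ((List.range (as.length + 1)).map (pvCnt as)) (-1) 0 = pvCnt as as.length := by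
        simp [PySem.List.pyGetD, PySem.List.pyGet?_neg_one, List.range_succ]
      rw [List.foldl_append, ih]
      simp only [List.foldl_cons, List.foldl_nil]
      rw [hlast]
      conv_rhs => rw [show (as ++ [v]).length + 1 = as.length + 1 + 1 by simp, List.range_succ,
        List.map_append]
      congr 1
      · apply List.map_congr_left
        intro k hk
        have hk' : k ≤ as.length := by simpa [Nat.lt_succ_iff] using List.mem_range.mp hk
        unfold pvCnt
        rw [List.take_append_of_le_length hk']
      · simp only [List.map_cons, List.map_nil]
        congr 1
        unfold pvCnt
        rw [show as.length + 1 = (as ++ [v]).length by simp, List.take_length, List.take_length,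
            List.countP_append]
        simp only [List.countP_cons, List.countP_nil]
        split_ifs <;> push_cast <;> omega

lemma evens_get (arr : List Int) {k : Int} (h0 : 0 ≤ k) (hn : k ≤ (arr.length : Int)) :
    PySem.List.pyGetD (buildEvens arr) k 0 = pvCnt arr k.toNat := by
  rw [PySem.List.pyGetD_of_nonneg _ _ h0, buildEvens_eq]
  rw [List.getD_eq_getElem?_getD, List.getElem?_map, List.getElem?_range (by omega)]
  rfl

lemma map_g_range_nonneg (arr : List Int) {l r : Int} (h0 : 0 ≤ l) (hlr : l ≤ r) (hr : r ≤ (arr.length : Int)) :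
    (PySem.List.pyRange l r).map (fun i => PySem.List.pyGetD arr i 0) =
      (arr.drop l.toNat).take (r - l).toNat := by
  have hsplit := PySem.List.pyRange_one_append l r (arr.length : Int) hlr hr
  have h1 := PySem.List.map_pyGetD_pyRange' arr 0 h0
  rw [hsplit, List.map_append] at h1
  have hlen : ((PySem.List.pyRange l r).map (fun i => PySem.List.pyGetD arr i 0)).length = (r - l).toNat := by
    simp [PySem.List.length_pyRange_one]
  calc (PySem.List.pyRange l r).map (fun i => PySem.List.pyGetD arr i 0)
      = (((PySem.List.pyRange l r).map (fun i => PySem.List.pyGetD arr i 0)) ++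
          ((PySem.List.pyRange r (arr.length : Int)).map (fun i => PySem.List.pyGetD arr i 0))).take (r - l).toNat :=
        (List.take_left' hlen).symm
    _ = (arr.drop l.toNat).take (r - l).toNat := by rw [h1]

lemma g_neg (arr : List Int) {i : Int} (h1 : -(arr.length : Int) ≤ i) (h2 : i < 0) :
    PySem.List.pyGetD arr i 0 = PySem.List.pyGetD arr ((arr.length : Int) + i) 0 := by
  unfold PySem.List.pyGetD
  rw [PySem.List.pyGet?_neg arr h2 h1, PySem.List.pyGet?_of_nonneg arr (by omega)]
  congr 2
  omega

lemma map_g_range_neg (arr : List Int) {l r : Int} (h0 : -(arr.length : Int) ≤ l) (hlr : l ≤ r) (hr : r ≤ 0) :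
    (PySem.List.pyRange l r).map (fun i => PySem.List.pyGetD arr i 0) =
      (arr.drop ((arr.length : Int) + l).toNat).take (r - l).toNat := by
  have hshift : (PySem.List.pyRange l r).map (fun i => PySem.List.pyGetD arr i 0) =
      (PySem.List.pyRange ((arr.length : Int) + l) ((arr.length : Int) + r)).map
        (fun i => PySem.List.pyGetD arr i 0) := by
    rw [PySem.List.pyRange_one, PySem.List.pyRange_one, List.map_map, List.map_map]
    rw [show ((arr.length : Int) + r - ((arr.length : Int) + l)).toNat = (r - l).toNat by omega]
    apply List.map_congr_left
    intro k hk
    have hk' : (k : Int) < r - l := by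
      have := List.mem_range.mp hk
      omega
    simp only [Function.comp]
    rw [g_neg arr (i := l + k) (by omega) (by omega)]
    congr 1
    ring
  rw [hshift, map_g_range_nonneg arr (by omega) (by omega) (by omega)]
  congr 1
  omega

lemma wrap_map (arr : List Int) {x y : Int} (hx0 : x ≤ 0) (hxn : 1 - (arr.length : Int) ≤ x)
    (hxy : x ≤ y) :
    (PySem.List.pyRange (x - 1) (min y 0)).map (fun i => PySem.List.pyGetD arr i 0) =
      pvWrapSeg arr x y := by
  have hmin1 : x - 1 ≤ min y 0 := le_min (by omega) (by omega)
  have hmin2 : min y 0 ≤ 0 := min_le_right y 0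
  rw [map_g_range_neg arr (by omega) hmin1 hmin2]
  unfold pvWrapSeg
  rcases le_total y 0 with hy | hy
  · rw [min_eq_left hy]
    congr 1
    · omega
    · congr 1
      omega
  · rw [min_eq_right hy]
    congr 1
    · omega
    · congr 1
      omega

lemma front_iff (arr : List Int) (y : Int) :
    (∀ v ∈ arr.take y.toNat, ¬ 2 ∣ v) ↔ (pvFront arr y).all pvOdd = true := by
  unfold pvFront
  rw [List.all_eq_true]
  constructor <;> intro h v hv
  · exact (pvOdd_true_iff v).mpr (h v hv)
  · exact (pvOdd_true_iff v).mp (h v hv)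

lemma wrapD_iff (arr : List Int) {x y : Int} (hx0 : x ≤ 0) (hxn : 1 - (arr.length : Int) ≤ x)
    (hxy : x ≤ y) :
    (∃ i ∈ PySem.List.pyRange (x - 1) (min y 0), 2 ∣ PySem.List.pyGetD arr i 0) ↔
      (pvWrapSeg arr x y).all pvOdd = false := by
  rw [← wrap_map arr hx0 hxn hxy]
  constructor
  · rintro ⟨i, hi, hd⟩
    rw [List.all_eq_false]
    exact ⟨_, List.mem_map_of_mem hi, by simp [(pvOdd_false_iff _).mpr hd]⟩
  · intro hall
    obtain ⟨v, hv, hnp⟩ := List.all_eq_false.mp hall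
    obtain ⟨i, hi, hgi⟩ := List.mem_map.mp hv
    have hvf : pvOdd v = false := by
      cases hb : pvOdd v with
      | false => rfl
      | true => exact absurd hb hnp
    exact ⟨i, hi, (pvOdd_false_iff _).mp (by rw [hgi]; exact hvf)⟩

lemma cnt_diff (arr : List Int) {l r : Nat} (h : l ≤ r) :
    (pvCnt arr r = pvCnt arr l) ↔ (((arr.drop l).take (r - l)).all pvOdd = true) := by
  unfold pvCnt
  rw [show r = l + (r - l) by omega, List.take_add, List.countP_append]
  rw [show l + (r - l) - l = r - l by omega]
  constructor
  · intro hc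
    have hz : ((arr.drop l).take (r - l)).countP (fun v => PySem.Int.mod v 2 == 0) = 0 := by
      push_cast at hc
      omega
    rw [List.all_eq_true]
    intro v hv
    have hnv := List.countP_eq_zero.mp hz v hv
    cases hb : (PySem.Int.mod v 2 == 0) with
    | false => simp only [pvOdd, hb, Bool.not_false]
    | true => exact absurd hb hnv
  · intro ha
    have hz : ((arr.drop l).take (r - l)).countP (fun v => PySem.Int.mod v 2 == 0) = 0 := by
      rw [List.countP_eq_zero]
      intro v hv
      have hav := List.all_eq_true.mp ha v hv
      cases hb : (PySem.Int.mod v 2 == 0) with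
      | false => simp
      | true => simp only [pvOdd, hb, Bool.not_true] at hav; exact absurd hav (by simp)
    rw [hz]
    push_cast
    ring

lemma aAns_empty (arr : List Int) {x y : Int} (h : y < x) : aAns arr (x, y) = "Odd" := by
  rw [aAns_eq, show y - 1 + 1 = y by ring, scan_eq_all, PySem.List.pyRange_one_eq_nil (by omega)]
  rfl

lemma bAns_empty (arr : List Int) {x y : Int} (h : y < x) : bAns arr (x, y) = "Odd" := by
  rw [bAns_eq]
  have hle : y ≤ max (x - 1) 0 := le_trans (by omega) (le_max_left _ _)
  simp [hle]

lemma aAns_pos (arr : List Int) {x y : Int} (h1 : 1 ≤ x) (h2 : x ≤ y) (h3 : y ≤ (arr.length : Int)) :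
    aAns arr (x, y) =
      if ((arr.drop (x - 1).toNat).take (y - (x - 1)).toNat).all pvOdd then "Odd" else "Even" := by
  rw [aAns_eq, show y - 1 + 1 = y by ring, scan_eq_all,
      show (fun i => pvOdd (PySem.List.pyGetD arr i 0)) =
        pvOdd ∘ (fun i => PySem.List.pyGetD arr i 0) from rfl,
      ← List.all_map, map_g_range_nonneg arr (by omega) (by omega) h3]

lemma bAns_pos (arr : List Int) {x y : Int} (h1 : 1 ≤ x) (h2 : x ≤ y) (h3 : y ≤ (arr.length : Int)) :
    bAns arr (x, y) =
      if ((arr.drop (x - 1).toNat).take (y - (x - 1)).toNat).all pvOdd then "Odd" else "Even" := by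
  rw [bAns_eq, show max (x - 1) 0 = x - 1 from max_eq_left (by omega)]
  rw [evens_get arr (by omega) h3, evens_get arr (by omega) (by omega)]
  rw [show decide (y ≤ x - 1) = false by simp; omega]
  simp only [Bool.false_or]
  have key := cnt_diff arr (l := (x - 1).toNat) (r := y.toNat) (by omega)
  rw [show (y - (x - 1)).toNat = y.toNat - (x - 1).toNat by omega]
  by_cases hc : pvCnt arr y.toNat = pvCnt arr (x - 1).toNat
  · rw [if_pos (beq_iff_eq.mpr hc), if_pos (key.mp hc)]
  · rw [if_neg (fun hb => hc (beq_iff_eq.mp hb)), if_neg (fun ha => hc (key.mpr ha))]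

lemma aAns_wrap (arr : List Int) {x y : Int} (hx0 : x ≤ 0) (hxn : 1 - (arr.length : Int) ≤ x)
    (hxy : x ≤ y) (hyn : y ≤ (arr.length : Int)) :
    aAns arr (x, y) =
      if (pvWrapSeg arr x y).all pvOdd && (pvFront arr y).all pvOdd then "Odd" else "Even" := by
  rw [aAns_eq, show y - 1 + 1 = y by ring, scan_eq_all,
      show (fun i => pvOdd (PySem.List.pyGetD arr i 0)) =
        pvOdd ∘ (fun i => PySem.List.pyGetD arr i 0) from rfl,
      ← List.all_map]
  rw [PySem.List.pyRange_one_append (x - 1) (min y 0) y (by omega) (by omega),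
      List.map_append, List.all_append]
  have hw := wrap_map arr hx0 hxn hxy
  have hf : (PySem.List.pyRange (min y 0) y).map (fun i => PySem.List.pyGetD arr i 0) =
      pvFront arr y := by
    by_cases hy : y ≤ 0
    · rw [min_eq_left hy, PySem.List.pyRange_one_eq_nil le_rfl]
      unfold pvFront
      rw [show y.toNat = 0 by omega]
      rfl
    · push_neg at hy
      rw [min_eq_right (by omega), map_g_range_nonneg arr le_rfl (by omega) hyn]
      unfold pvFront
      simp
  rw [hw, hf]

lemma bAns_wrap (arr : List Int) {x y : Int} (hx0 : x ≤ 0) (hxy : x ≤ y) (hyn : y ≤ (arr.length : Int)) :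
    bAns arr (x, y) = if (pvFront arr y).all pvOdd then "Odd" else "Even" := by
  rw [bAns_eq, show max (x - 1) 0 = 0 from max_eq_right (by omega)]
  by_cases hy : y ≤ 0
  · have hfr : pvFront arr y = [] := by
      unfold pvFront
      rw [show y.toNat = 0 by omega]
      rfl
    simp [hy, hfr]
  · push_neg at hy
    rw [show decide (y ≤ (0 : Int)) = false by simp; omega]
    simp only [Bool.false_or]
    rw [evens_get arr (by omega) hyn, evens_get arr (by omega) (by omega)]
    rw [show ((0 : Int)).toNat = 0 from rfl]
    have h0 : pvCnt arr 0 = 0 := by simp [pvCnt]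
    have key := cnt_diff arr (l := 0) (r := y.toNat) (by omega)
    have hfr : pvFront arr y = (arr.drop 0).take (y.toNat - 0) := by
      unfold pvFront
      simp
    rw [hfr]
    by_cases hc : pvCnt arr y.toNat = pvCnt arr 0
    · rw [if_pos (beq_iff_eq.mpr hc), if_pos (key.mp hc)]
    · rw [if_neg (fun hb => hc (beq_iff_eq.mp hb)), if_neg (fun ha => hc (key.mpr ha))]

lemma ab_eq (arr : List Int) {x y : Int}
    (hpre : y < x ∨ (1 - (arr.length : Int) ≤ x ∧ y ≤ (arr.length : Int)))
    (hnd : ¬ ((∀ v ∈ arr.take y.toNat, ¬ 2 ∣ v) ∧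
      ∃ i ∈ PySem.List.pyRange (x - 1) (min y 0), 2 ∣ PySem.List.pyGetD arr i 0)) :
    aAns arr (x, y) = bAns arr (x, y) := by
  by_cases hxy : y < x
  · rw [aAns_empty arr hxy, bAns_empty arr hxy]
  · push_neg at hxy
    rcases hpre with h | ⟨h1, h2⟩
    · omega
    by_cases hx : 1 ≤ x
    · rw [aAns_pos arr hx hxy h2, bAns_pos arr hx hxy h2]
    · push_neg at hx
      have hx0 : x ≤ 0 := by omega
      rw [aAns_wrap arr hx0 h1 hxy h2, bAns_wrap arr hx0 hxy h2]
      by_cases hfr : (pvFront arr y).all pvOdd = true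
      · have hwr : (pvWrapSeg arr x y).all pvOdd = true := by
          by_contra hw
          have hw' : (pvWrapSeg arr x y).all pvOdd = false := by simpa using hw
          exact hnd ⟨(front_iff arr y).mpr hfr, (wrapD_iff arr hx0 h1 hxy).mpr hw'⟩
        rw [hfr, hwr]
        rfl
      · have hfr' : (pvFront arr y).all pvOdd = false := by simpa using hfr
        rw [hfr']
        simp

-- ===== VERDICT (by name: the statement is the Claim_ definition above) =====
theorem solve_spec : Claim_unchanged_solve := by
  intro arr queries _hDom hPre hnd
  rw [solve_eq_map, solve_alt_eq_map]
  apply List.map_congr_left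
  intro q hq
  obtain ⟨x, y⟩ := q
  exact ab_eq arr (hPre _ hq) (fun h => hnd ⟨(x, y), hq, h.1, h.2⟩)

theorem solve_changed : Claim_changed_solve := by
  unfold Claim_changed_solve
  refine ⟨by decide, by decide, by decide, ?_, by decide, by decide⟩
  have h1 : solveScan [1, 2] (-1) 1 = false := by
    rw [scan_eq_all]
    decide
  show solve [1, 2] [(0, 1)] = ["Even"]
  rw [solve_eq_map]
  simp [aAns, h1]

theorem solve_tight : Claim_exact_solve := by
  intro arr queries _hDom hPre hD heq
  obtain ⟨q, hq, hfrontP, hexP⟩ := hD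
  obtain ⟨x, y⟩ := q
  replace hfrontP : ∀ v ∈ arr.take y.toNat, ¬ 2 ∣ v := hfrontP
  replace hexP : ∃ i ∈ PySem.List.pyRange (x - 1) (min y 0), 2 ∣ PySem.List.pyGetD arr i 0 := hexP
  obtain ⟨i, hi, hdvd⟩ := hexP
  have hib := PySem.List.mem_pyRange_one.mp hi
  have hm1 : min y 0 ≤ y := min_le_left y 0
  have hm2 : min y 0 ≤ 0 := min_le_right y 0
  have hx0 : x ≤ 0 := by omega
  have hxy : x ≤ y := by omega
  rw [solve_eq_map, solve_alt_eq_map] at heq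
  have hone := List.map_inj_left.mp heq _ hq
  rcases hPre _ hq with h | ⟨h1, h2⟩
  · replace h : y < x := h
    omega
  · replace h1 : 1 - (arr.length : Int) ≤ x := h1
    replace h2 : y ≤ (arr.length : Int) := h2
    have hfr : (pvFront arr y).all pvOdd = true := (front_iff arr y).mp hfrontP
    have hwrap : (pvWrapSeg arr x y).all pvOdd = false :=
      (wrapD_iff arr hx0 h1 hxy).mp ⟨i, hi, hdvd⟩
    rw [aAns_wrap arr hx0 h1 hxy h2, bAns_wrap arr hx0 hxy h2] at hone
    rw [hfr, hwrap] at hone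
    simp at hone
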